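/- GENERATED by mk_final_copies.py from the proof of the farm's unit `start_decoder.C9c` (farm:start_decoder.C9c.1: Proof.lean) as the
   re-elaboration sweep compiled it — do not edit. -/
import Asan.CheckWalk
import Vorbis.Spec.Units.start_decoder_C9c
import Vorbis.Spec.StartDecoderCarry
import Vorbis.Spec.StartDecoderC7
import Vorbis.Spec.StartDecoderC4
import Vorbis.Spec.Worked.start_decoder_C9c_Lemmas

open X86 X86.User Asan Vorbis Vorbis.Spec Vorbis.Spec.StartDecoder

set_option maxRecDepth 100000
set_option maxHeartbeats 4000000

namespace Vorbis.Spec.start_decoder_C9c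

/-- **Segment C9c of `start_decoder`** (`cut119` 0x11473b, the return of `get_bits(f, 4)`): `mov ebx, eax`, the checked byte store
`c->lookup_type = bl` (`C7.cb_site … 25 1`), `> 2` → the stub 0x114b7f (`error(f, 20)`, exit `AtC9d` at `cut147`); type 0 → `AtC10`
at `cut120`; type 1, 2: the two checked loads `c->entries`, `c->dimensions` (named before the walk: `En`, `Dn` from K1), the 64-bit
product (`hmul`), `> 0x1FFFFFFF` → the stub 0x114b96 (`error`, `AtC9d` at `cut148`), else `AtC11` at `cut149`. ONE walk; the invariant
side of every exit is `c9c_carry` + `c9c_exit_*` of Lemmas.lean over ONE footprint from `v` (`u_same`: the pushed return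
addresses / `error`'s frame, the byte `[c + 25, c + 26)`, `f->error`). -/
theorem c9c_walk : Vorbis.Spec.start_decoder_C9c.Statement := by
  intro Lay hLay μ hμ u₀ hcode hst1 hld4 h_err
  intro g i v hat
  obtain ⟨A, A2, A3, Ai, h⟩ := hat
  have hfr := h.frame
  have hhand := h.cur.hand
  have he := hfr.entry
  v_entry he
  simp only [depth] at he_room he_stack
  have w_rip := hfr.rip
  obtain ⟨hr1, hr2⟩ := hfr.r_eq
  simp only [steady] at hr1
  have hRA : g.RA = (g.e.reg .rsp).toNat := rfl
  have c_rsp : v.reg .rsp = g.e.reg .rsp - 1480 := by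
    rw [hfr.rsp]
    refine (eq_addr _ _ ?_).symm
    unfold Ghost.R Ghost.RA steady
    u_omega
  have hcr := C7.cb_range h.cur
  obtain ⟨c, hc⟩ : ∃ c, g.cb v.mem i = c := ⟨_, rfl⟩
  rw [hc] at hcr
  obtain ⟨hcr1, hcr2, hcr3⟩ := hcr
  obtain ⟨cw, hcw⟩ : ∃ cw : Word, cw = addr c := ⟨_, rfl⟩
  have hcwn : cw.toNat = c := by
    rw [hcw]
    exact toNat_addr _ (by omega)
  have c_r14 : v.reg .r14 = cw := by
    rw [hcw, ← hc]
    exact h.cur.r14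
  obtain ⟨z, hz, c_rax⟩ : ∃ z, z < 16 ∧ v.reg .rax = UInt64.ofNat z := ⟨_, h.rax, (UInt64.ofNat_toNat).symm⟩
  have hbv : (BitVec.setWidth 8 (Word.part Width.w32 (UInt64.ofNat z))).toNat = z := by
    rw [cnt32_part, BitVec.toNat_setWidth, toNat_ofNat32 z (by omega)]
    omega
  have sl_f : v.mem.readLE (g.e.reg .rsp - 1456) 8 = g.f := by
    have e : addr (g.R + 0x18) = g.e.reg .rsp - 1456 := by
      refine (eq_addr _ _ ?_).symm
      unfold Ghost.R Ghost.RA steady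
      u_omega
    rw [← e]
    exact h.cur.slot_f
  -- the two loads of FIX 3, named before the walk: entries and dimensions as numbers
  have hk1 := h.k.k1
  rw [hc] at hk1
  obtain ⟨En, hEn, r_E, hEv⟩ : ∃ En, En < 2 ^ 24 ∧ v.mem.readLE (cw + 4) 4 = En ∧ Codebook.entries v.mem c = (En : Int) := by
    have e1 : cw + 4 = addr (c + 4) := by
      rw [hcw, addr_add_lit]
    have k1 := hk1.ent_nonneg
    have k2 := hk1.ent_lt
    simp only [vacc, voff, Mem.i32_def] at k1 k2 ⊢
    unfold Mem.u32 at k1 k2 ⊢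
    rw [← e1] at k1 k2 ⊢
    have hc4 := sint32_cases (v.mem.readLE (cw + 4) 4)
    have hlt4 : v.mem.readLE (cw + 4) 4 < 256 ^ 4 := Mem.readLE_lt' _ _ _
    refine ⟨_, ?_, rfl, ?_⟩
    · omega
    · omega
  obtain ⟨Dn, hDn1, hDn2, r_D, hDv⟩ : ∃ Dn, 1 ≤ Dn ∧ Dn ≤ 65535 ∧ v.mem.readLE cw 4 = Dn ∧
      Codebook.dimensions v.mem c = (Dn : Int) := by
    have e1 : cw = addr (c + 0) := by
      rw [hcw]
      rfl
    have k1 := hk1.dim_pos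
    have k2 := hk1.dim_le
    simp only [vacc, voff, Mem.i32_def] at k1 k2 ⊢
    unfold Mem.u32 at k1 k2 ⊢
    rw [← e1] at k1 k2 ⊢
    have hc4 := sint32_cases (v.mem.readLE cw 4)
    have hlt4 : v.mem.readLE cw 4 < 256 ^ 4 := Mem.readLE_lt' _ _ _
    refine ⟨_, ?_, ?_, rfl, ?_⟩
    · omega
    · omega
    · omega
  have hprodlt : En * Dn < 2 ^ 40 := by
    have : En * Dn ≤ 2 ^ 24 * 65535 := Nat.mul_le_mul (by omega) hDn2
    omega
  have hmul : (UInt64.ofNat En * UInt64.ofNat Dn).toNat = En * Dn := by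
    rw [UInt64.toNat_mul, UInt64.toNat_ofNat', UInt64.toNat_ofNat']
    have e1 : En % 2 ^ 64 = En := Nat.mod_eq_of_lt (by omega)
    have e2 : Dn % 2 ^ 64 = Dn := Nat.mod_eq_of_lt (by omega)
    rw [e1, e2]
    exact Nat.mod_eq_of_lt (by omega)
  have hpos : Pos g A := Pos.of hfr h.cur
  have hm0 : MInv g i A2 A3 Ai A v.mem := MInv.of hfr h.cur
  have hcwh := hm0.c_where
  rw [hc] at hcwh
  have htx := hhand.arenaText
  simp only [Vorbis.L.textHi] at htx
  have hctx : 1154368 ≤ c := by omega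
  have e25 : cw + 25 = addr (c + 25) := by
    rw [hcw, addr_add_lit]
  have w_eq : Mem.EqOn Vorbis.L.textLo Vorbis.L.textHi u₀.mem v.mem := hfr.code
  have hdf : v.flags .df = false := (show abiInv _ from hfr.inv).1
  have hmx : v.mxcsr &&& 0x1F80 = 0x1F80 := (show abiInv _ from hfr.inv).2
  have hsse := Vorbis.sseOK_of_abiInv hfr.inv
  have herr' := h_err A.2 g.frames'
  have t1 : (g.e.reg .rsp - 1488).toNat = (g.e.reg .rsp).toNat - 1488 := by u_omega
  have hRn : g.R = (g.e.reg .rsp).toNat - 1480 := by omega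
  have hobr := h.cur.sd.bits.OBR
  simp only [voff] at hobr
  have hfn : (UInt64.ofNat g.f).toNat = g.f := toNat_addr g.f (by omega)
  u_walk hcode [hμ.vendor, hbv, cnt32_sext_bv En (by omega), cnt32_sext_bv Dn (by omega), hmul]
    until [Vorbis.L.start_decoder.cut120, Vorbis.L.start_decoder.cut147,
      Vorbis.L.start_decoder.cut148, Vorbis.L.start_decoder.cut149] span [Vorbis.L.textLo, Vorbis.L.textHi] side (v_side)
  case check_114741 =>
    -- 0x114741: the check of the byte store `c->lookup_type = bl`
    have hun : ShadowUntouched v.mem s_114741.mem := by v_untouched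
    have hs := C7.cb_site h.cur 25 1 (by omega) (by omega)
    rw [hc] at hs
    apply Vorbis.Spec.check_site hfr.shadow hun hs
    u_omega
  case call_inv => v_inv
  case pre_114b8c =>
    -- 0x114b8c: `error(f, VORBIS_invalid_setup)` of `lookup_type > 2`
    have hun : ShadowUntouched v.mem s_114b8c.mem := by v_untouched
    have hf : (s_114b8c.reg .rdi).toNat = g.f := by
      rw [w_rdi]
      exact hfn
    have hrs : (s_114b8c.reg .rsp).toNat + 8 = g.R := by
      rw [w_rsp, t1]
      omega
    refine ⟨⟨?_, hfr.offText⟩, ?_⟩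
    · rw [hrs]
      exact hfr.shadow.untouched hun
    · rw [hf]
      exact hhand.obj.mono (C4.sub_frames g A)
  case check_11475b =>
    -- 0x11475b: the check of the load `c->entries`
    have hun : ShadowUntouched v.mem s_11475b.mem := by v_untouched
    have hs := C7.cb_site h.cur 4 4 (by omega) (by omega)
    rw [hc] at hs
    apply Vorbis.Spec.check_site hfr.shadow hun hs
    u_omega
  case check_114767 =>
    -- 0x114767: the check of the load `c->dimensions`
    have hun : ShadowUntouched v.mem s_114767.mem := by v_untouched
    have hs := C7.cb_site h.cur 0 4 (by omega) (by omega)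
    rw [hc] at hs
    apply Vorbis.Spec.check_site hfr.shadow hun hs
    u_omega
  case call_inv => v_inv
  case pre_114ba3 =>
    -- 0x114ba3: `error(f, VORBIS_invalid_setup)` of FIX 3
    have hun : ShadowUntouched v.mem s_114ba3.mem := by v_untouched
    have hf : (s_114ba3.reg .rdi).toNat = g.f := by
      rw [w_rdi]
      exact hfn
    have hrs : (s_114ba3.reg .rsp).toNat + 8 = g.R := by
      rw [w_rsp, t1]
      omega
    refine ⟨⟨?_, hfr.offText⟩, ?_⟩
    · rw [hrs]
      exact hfr.shadow.untouched hun
    · rw [hf]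
      exact hhand.obj.mono (C4.sub_frames g A)
  · -- 0x114b91 (`cut147`): `error` returned in the stub of `lookup_type > 2`
    v_after_call w_rsp_114b8c w_mem_114b8c
    have hf : (s_114b8c.reg .rdi).toNat = g.f := by
      rw [w_rdi_114b8c]
      exact hfn
    simp only [hf, t1] at w_same
    have hp : s_114b8cr.reg .rax = 0 ∧ ShadowUntouched s_114b8c.mem s_114b8cr.mem ∧
        s_114b8cr.mem.readLE (s_114b8c.reg .rdi + 140) 4 = (s_114b8c.reg .rsi).toNat % 2 ^ 32 := w_post
    have hs : Mem.SameExcept [⟨(g.e.reg .rsp).toNat - 1488 - 48, (g.e.reg .rsp).toNat - 1480⟩,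
        ⟨cw.toNat + 25, cw.toNat + 26⟩, ⟨g.f + 140, g.f + 144⟩] v.mem s_114b8cr.mem := by
      u_same
    have hun : ShadowUntouched v.mem s_114b8cr.mem := by v_untouched
    have hok : ∀ w, w ∈ [(⟨(g.e.reg .rsp).toNat - 1488 - 48, (g.e.reg .rsp).toNat - 1480⟩ : Span),
        ⟨cw.toNat + 25, cw.toNat + 26⟩, ⟨g.f + 140, g.f + 144⟩] → C9cWin g c w := by
      intro w hw
      simp only [List.mem_cons, List.mem_nil_iff, or_false] at hw
      unfold C9cWin
      rcases hw with rfl | rfl | rfl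
      all_goals simp only []
      all_goals omega
    obtain ⟨hm, hcb, hk, hlv, hmu⟩ := c9c_carry h hc hs hun hok
    refine ReachVia.done (Or.inr (Or.inr ?_))
    exact c9c_exit_err h hm hcb (Or.inl w_rip) (by rw [w_rsp, ← c_rsp]; exact hfr.rsp) (Vorbis.conv_code_eqOn w_code)
      w_inv (by rw [w_kept .r14 rfl, c_r14, hcw]) hp.1
  · -- 0x114788 (`cut120`): lookup_type = 0, the book is finished
    have hs : Mem.SameExcept [⟨(g.e.reg .rsp).toNat - 1488, (g.e.reg .rsp).toNat - 1480⟩,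
        ⟨cw.toNat + 25, cw.toNat + 26⟩] v.mem s_114782.mem := by
      u_same
    have hun : ShadowUntouched v.mem s_114782.mem := by v_untouched
    have hok : ∀ w, w ∈ [(⟨(g.e.reg .rsp).toNat - 1488, (g.e.reg .rsp).toNat - 1480⟩ : Span),
        ⟨cw.toNat + 25, cw.toNat + 26⟩] → C9cWin g c w := by
      intro w hw
      simp only [List.mem_cons, List.mem_nil_iff, or_false] at hw
      unfold C9cWin
      rcases hw with rfl | rfl
      all_goals simp only []
      all_goals omega
    obtain ⟨hm, hcb, hk, hlv, hmu⟩ := c9c_carry h hc hs hun hok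
    have hlt : Codebook.lookup_type s_114782.mem c = z := by
      simp only [vacc, voff]
      unfold Mem.u8
      rw [← e25, w_mem, Mem.readLE_writeLE_same _ _ 1 _ (by decide)]
      omega
    rw [hbv] at hbr_114755
    have habi : abiInv s_114782 := by
      refine Vorbis.abiInv_of ?_ ?_
      · rw [w_flags]
        simp only [X86.User.df_setStatus]
        exact w_df_114741
      · rw [w_mxcsr]
        exact hmx
    refine ReachVia.done (Or.inl ?_)
    exact c9c_exit_C10 h hm hcb hk hmu (by rw [hlt]; exact hbr_114755) w_rip (by rw [w_rsp, ← c_rsp]; exact hfr.rsp) w_eq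
      habi (by rw [w_kept .r14 rfl, c_r14, hcw])
  · -- 0x114ba8 (`cut148`): `error` returned in the stub of FIX 3
    v_after_call w_rsp_114ba3 w_mem_114ba3
    have hf : (s_114ba3.reg .rdi).toNat = g.f := by
      rw [w_rdi_114ba3]
      exact hfn
    simp only [hf, t1] at w_same
    have hp : s_114ba3r.reg .rax = 0 ∧ ShadowUntouched s_114ba3.mem s_114ba3r.mem ∧
        s_114ba3r.mem.readLE (s_114ba3.reg .rdi + 140) 4 = (s_114ba3.reg .rsi).toNat % 2 ^ 32 := w_post
    have hs : Mem.SameExcept [⟨(g.e.reg .rsp).toNat - 1488 - 48, (g.e.reg .rsp).toNat - 1480⟩,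
        ⟨cw.toNat + 25, cw.toNat + 26⟩, ⟨g.f + 140, g.f + 144⟩] v.mem s_114ba3r.mem := by
      u_same
    have hun : ShadowUntouched v.mem s_114ba3r.mem := by v_untouched
    have hok : ∀ w, w ∈ [(⟨(g.e.reg .rsp).toNat - 1488 - 48, (g.e.reg .rsp).toNat - 1480⟩ : Span),
        ⟨cw.toNat + 25, cw.toNat + 26⟩, ⟨g.f + 140, g.f + 144⟩] → C9cWin g c w := by
      intro w hw
      simp only [List.mem_cons, List.mem_nil_iff, or_false] at hw
      unfold C9cWin
      rcases hw with rfl | rfl | rfl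
      all_goals simp only []
      all_goals omega
    obtain ⟨hm, hcb, hk, hlv, hmu⟩ := c9c_carry h hc hs hun hok
    refine ReachVia.done (Or.inr (Or.inr ?_))
    exact c9c_exit_err h hm hcb (Or.inr w_rip) (by rw [w_rsp, ← c_rsp]; exact hfr.rsp) (Vorbis.conv_code_eqOn w_code)
      w_inv (by rw [w_kept .r14 rfl, c_r14, hcw]) hp.1
  · -- 0x114bad (`cut149`): lookup_type ∈ {1, 2} and FIX 3's product test passed
    have hs : Mem.SameExcept [⟨(g.e.reg .rsp).toNat - 1488, (g.e.reg .rsp).toNat - 1480⟩,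
        ⟨cw.toNat + 25, cw.toNat + 26⟩] v.mem s_114782.mem := by
      u_same
    have hun : ShadowUntouched v.mem s_114782.mem := by v_untouched
    have hok : ∀ w, w ∈ [(⟨(g.e.reg .rsp).toNat - 1488, (g.e.reg .rsp).toNat - 1480⟩ : Span),
        ⟨cw.toNat + 25, cw.toNat + 26⟩] → C9cWin g c w := by
      intro w hw
      simp only [List.mem_cons, List.mem_nil_iff, or_false] at hw
      unfold C9cWin
      rcases hw with rfl | rfl
      all_goals simp only []
      all_goals omega
    obtain ⟨hm, hcb, hk, hlv, hmu⟩ := c9c_carry h hc hs hun hok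
    have hlt : Codebook.lookup_type s_114782.mem c = z := by
      simp only [vacc, voff]
      unfold Mem.u8
      rw [← e25, w_mem]
      u_read
    rw [hbv] at hbr_114782 hbr_11474d
    rw [hmul] at hbr_11477a
    -- the struct's first eight bytes (dimensions, entries) are untouched
    have heq : Mem.EqOn c (c + 8) v.mem s_114782.mem := by
      apply hs.eqOn
      intro w hw
      simp only [List.mem_cons, List.mem_nil_iff, or_false] at hw
      rcases hw with rfl | rfl
      all_goals simp only []
      all_goals omega
    have hE : Codebook.entries s_114782.mem c = (En : Int) := by
      rw [← hEv]
      simp only [vacc, voff]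
      exact heq.i32 (c + 4) (by omega) (by omega) (by omega)
    have hD : Codebook.dimensions s_114782.mem c = (Dn : Int) := by
      rw [← hDv]
      simp only [vacc, voff]
      exact heq.i32 (c + 0) (by omega) (by omega) (by omega)
    have hprod : Codebook.entries s_114782.mem c * Codebook.dimensions s_114782.mem c ≤ 0x1FFFFFFF := by
      rw [hE, hD]
      have h1 : ((En * Dn : Nat) : Int) ≤ 536870911 := by omega
      rw [Int.natCast_mul] at h1
      exact h1
    have habi : abiInv s_114782 := by
      refine Vorbis.abiInv_of ?_ ?_
      · rw [w_flags]
        simp only [X86.User.df_setStatus]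
        exact w_df_114767
      · rw [w_mxcsr]
        exact hmx
    have h12 : Codebook.lookup_type s_114782.mem c = 1 ∨ Codebook.lookup_type s_114782.mem c = 2 := by
      rw [hlt]
      omega
    refine ReachVia.done (Or.inr (Or.inl ?_))
    exact c9c_exit_C11 h hm hcb hk hlv hmu h12 hprod w_rip (by rw [w_rsp, ← c_rsp]; exact hfr.rsp) w_eq habi
      (by rw [w_kept .r14 rfl, c_r14, hcw])

end Vorbis.Spec.start_decoder_C9c

/-- The unit `start_decoder.C9c`. -/
theorem Vorbis.Spec.Worked.start_decoder_C9c_ok : Vorbis.Spec.start_decoder_C9c.Statement := Vorbis.Spec.start_decoder_C9c.c9c_walk
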